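-- pv_equiv track=rewrite | github.com/Bakla83/py1 | task1.py | find_divisor_with_max_coprime_digits
-- ===== SOURCE A (Python) =====
-- def greatest_common_divisor(a, b):
--     while b != 0:
--         a, b = b, a % b
--     return a
--
-- def is_coprime(x, y):
--     return greatest_common_divisor(x, y) == 1
--
-- def find_divisor_with_max_coprime_digits(number):
--     max_coprime_count = 0
--     max_coprime_divisor = 1
--     for i in range(2, number + 1):
--         if number % i == 0:
--             coprime_count = 0
--             for digit in str(number):
--                 if is_coprime(int(digit), i):
--                     coprime_count += 1
--             if coprime_count > max_coprime_count:
--                 max_coprime_count = coprime_count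
--                 max_coprime_divisor = i
--     return max_coprime_divisor
-- ===== SOURCE B (Python) =====
-- def find_divisor_with_max_coprime_digits(number):
--     # Enumerate divisors in O(sqrt(number)) pairs (d, number // d) instead of
--     # scanning every i in 2..number, then scan them in increasing order.
--     def gcd(a, b):
--         while b != 0:
--             a, b = b, a % b
--         return a
--     divisors = set()
--     d = 1
--     while d * d <= number:
--         if number % d == 0:
--             if d >= 2:
--                 divisors.add(d)
--             if number // d >= 2:
--                 divisors.add(number // d)
--         d += 1
--     if not divisors:
--         return 1
--     digits = [int(c) for c in str(number)]
--     best_count, best_divisor = 0, 1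
--     for i in sorted(divisors):
--         count = sum(1 for x in digits if gcd(x, i) == 1)
--         if count > best_count:
--             best_count, best_divisor = count, i
--     return best_divisor
-- ===== Notes on version B (the rewrite author's own statement) =====
-- stated objective: faster
-- what changed: Instead of testing every i in 2..number for divisibility, B enumerates divisor pairs (d, number//d) for d up to sqrt(number), then scans only the sorted divisors for the best coprime-digit count.
import Mathlib
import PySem

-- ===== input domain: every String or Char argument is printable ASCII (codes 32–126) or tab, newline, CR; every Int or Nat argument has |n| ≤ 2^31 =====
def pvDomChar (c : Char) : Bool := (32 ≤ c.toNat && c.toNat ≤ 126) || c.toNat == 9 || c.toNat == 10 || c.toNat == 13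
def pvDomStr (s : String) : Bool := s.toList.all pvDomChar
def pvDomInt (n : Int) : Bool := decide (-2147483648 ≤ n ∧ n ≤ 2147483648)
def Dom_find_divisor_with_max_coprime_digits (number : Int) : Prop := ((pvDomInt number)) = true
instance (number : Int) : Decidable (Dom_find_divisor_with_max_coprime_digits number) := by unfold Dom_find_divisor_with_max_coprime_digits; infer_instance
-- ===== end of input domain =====

-- B replaces A's scan of every candidate i in 2..number by an O(√number) enumeration
-- of divisor pairs (d, number // d), then scans only the (sorted) divisors. Objective: faster.


-- ===== PORT A =====
-- greatest_common_divisor(a, b): the while loop as recursion on b (|a % b| < |b| for b ≠ 0).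
-- Both Pythons contain this identical helper, so both ports share it.
def pyGcd (a b : Int) : Int :=
  if b ≠ 0 then pyGcd b (PySem.Int.mod a b) else a
termination_by b.natAbs
decreasing_by
  rename_i h
  rcases lt_trichotomy b 0 with hb | hb | hb
  · have := PySem.Int.mod_neg_bounds a hb; omega
  · exact absurd hb h
  · have h1 := PySem.Int.mod_nonneg a hb; have h2 := PySem.Int.mod_lt a hb; omega

-- int(c) for a single character c: exact on digit characters, the only ones either
-- Python feeds to int() on an executed path (both programs' loops run only for number ≥ 2,
-- whose decimal string is all digits).
def pyDigit (c : Char) : Int := (PySem.Int.ofChars? [c]).getD 0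

-- A's inner loop: coprime_count for divisor i, iterating over the characters of str(number).
def countA (number i : Int) : Int :=
  ((PySem.Int.toStr number).toList).foldl
    (fun c ch => if pyGcd (pyDigit ch) i = 1 then c + 1 else c) 0

def find_divisor_with_max_coprime_digits (number : Int) : Int :=
  ((PySem.List.pyRange 2 (number + 1) 1).foldl
    (fun (st : Int × Int) i =>
      if PySem.Int.mod number i = 0 then
        if st.1 < countA number i then (countA number i, i) else st
      else st)
    (0, 1)).2

-- ===== PORT B =====
-- the 'while d * d <= number' loop of Source B, collecting the divisor set
def collectDivisors (number d : Int) (divisors : PySem.Set Int) : PySem.Set Int :=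
  if d * d ≤ number then
    collectDivisors number (d + 1)
      (if PySem.Int.mod number d = 0 then
        (let s := if 2 ≤ d then PySem.Set.add divisors d else divisors
         if 2 ≤ PySem.Int.floordiv number d then
           PySem.Set.add s (PySem.Int.floordiv number d) else s)
       else divisors)
  else divisors
termination_by (number + 1 - d).toNat
decreasing_by
  rename_i h
  have hd : d ≤ number := by
    rcases le_or_gt d 0 with h0 | h0
    · nlinarith
    · nlinarith
  omega

-- B's per-divisor count: sum(1 for x in digits if gcd(x, i) == 1)
def countB (digits : List Int) (i : Int) : Int :=
  digits.foldl (fun c x => if pyGcd x i = 1 then c + 1 else c) 0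

def find_divisor_with_max_coprime_digits_alt (number : Int) : Int :=
  let divisors := collectDivisors number 1 PySem.Set.empty
  if divisors = [] then 1
  else
    let digits := ((PySem.Int.toStr number).toList).map pyDigit
    ((PySem.List.sorted divisors (fun x => x) false).foldl
      (fun (st : Int × Int) i =>
        if st.1 < countB digits i then (countB digits i, i) else st)
      (0, 1)).2

-- ===== PRECONDITION & SPEC =====
def Spec_find_divisor_with_max_coprime_digits (number : Int) (out : Int) : Prop := out = find_divisor_with_max_coprime_digits_alt number
instance (number : Int) (out : Int) : Decidable (Spec_find_divisor_with_max_coprime_digits number out) := by unfold Spec_find_divisor_with_max_coprime_digits; infer_instance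

-- ===== CLAIM (what is proved, stated in full; the proofs are below) =====
def Claim_equal_find_divisor_with_max_coprime_digits : Prop := ∀ (number : Int), Dom_find_divisor_with_max_coprime_digits number → Spec_find_divisor_with_max_coprime_digits number (find_divisor_with_max_coprime_digits number)

-- ===== LEMMAS AND PROOFS =====

theorem step_char (n d e q : Int) (hd : 1 ≤ d) (hdd : d * d ≤ n) (hdvd : d ∣ n) (hq : q * d = n) :
    ((2 ≤ d ∧ e = d) ∨ (2 ≤ q ∧ e = q) ∨
      (2 ≤ e ∧ (d + 1 ≤ e ∧ e * e ≤ n ∧ e ∣ n ∨ ∃ c, n = e * c ∧ d + 1 ≤ c ∧ c * c ≤ n)))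
    ↔ (2 ≤ e ∧ (d ≤ e ∧ e * e ≤ n ∧ e ∣ n ∨ ∃ c, n = e * c ∧ d ≤ c ∧ c * c ≤ n)) := by
  constructor
  · rintro (⟨h2, rfl⟩ | ⟨h2, rfl⟩ | ⟨h2, ⟨h3, h4, h5⟩ | ⟨c, hc, h3, h4⟩⟩)
    · exact ⟨h2, Or.inl ⟨le_refl _, hdd, hdvd⟩⟩
    · exact ⟨h2, Or.inr ⟨d, hq.symm, le_refl _, hdd⟩⟩
    · exact ⟨h2, Or.inl ⟨by omega, h4, h5⟩⟩
    · exact ⟨h2, Or.inr ⟨c, hc, by omega, h4⟩⟩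
  · rintro ⟨h2, ⟨h3, h4, h5⟩ | ⟨c, hc, h3, h4⟩⟩
    · rcases eq_or_lt_of_le h3 with rfl | h3'
      · exact Or.inl ⟨h2, rfl⟩
      · exact Or.inr (Or.inr ⟨h2, Or.inl ⟨by omega, h4, h5⟩⟩)
    · rcases eq_or_lt_of_le h3 with rfl | h3'
      · have hde : q = e := by
          have hd0 : d ≠ 0 := by omega
          apply mul_right_cancel₀ hd0; rw [hq, hc, mul_comm]
        exact Or.inr (Or.inl ⟨by omega, hde.symm⟩)
      · exact Or.inr (Or.inr ⟨h2, Or.inr ⟨c, hc, by omega, h4⟩⟩)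

theorem step_char' (n d e : Int) (hnd : ¬ d ∣ n) :
    (2 ≤ e ∧ (d + 1 ≤ e ∧ e * e ≤ n ∧ e ∣ n ∨ ∃ c, n = e * c ∧ d + 1 ≤ c ∧ c * c ≤ n))
    ↔ (2 ≤ e ∧ (d ≤ e ∧ e * e ≤ n ∧ e ∣ n ∨ ∃ c, n = e * c ∧ d ≤ c ∧ c * c ≤ n)) := by
  constructor
  · rintro ⟨h2, ⟨h3, h4, h5⟩ | ⟨c, hc, h3, h4⟩⟩
    · exact ⟨h2, Or.inl ⟨by omega, h4, h5⟩⟩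
    · exact ⟨h2, Or.inr ⟨c, hc, by omega, h4⟩⟩
  · rintro ⟨h2, ⟨h3, h4, h5⟩ | ⟨c, hc, h3, h4⟩⟩
    · rcases eq_or_lt_of_le h3 with rfl | h3'
      · exact absurd h5 hnd
      · exact ⟨h2, Or.inl ⟨by omega, h4, h5⟩⟩
    · rcases eq_or_lt_of_le h3 with rfl | h3'
      · exact absurd ⟨e, by linarith [hc]⟩ hnd
      · exact ⟨h2, Or.inr ⟨c, hc, by omega, h4⟩⟩

theorem mem_collectDivisors (n : Int) (d : Int) (acc : PySem.Set Int) (e : Int) :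
    1 ≤ d → (e ∈ collectDivisors n d acc ↔
      e ∈ acc ∨ (2 ≤ e ∧ (d ≤ e ∧ e * e ≤ n ∧ e ∣ n ∨ ∃ c, n = e * c ∧ d ≤ c ∧ c * c ≤ n))) := by
  fun_induction collectDivisors n d acc with
  | case1 d acc hle ih =>
    intro hd
    simp only [dite_eq_ite] at ih
    rw [ih (by omega)]
    by_cases hm : PySem.Int.mod n d = 0
    · have hdvd : d ∣ n := (PySem.Int.mod_eq_zero_iff_dvd n d).mp hm
      have hq : PySem.Int.floordiv n d * d = n := by
        rw [PySem.Int.floordiv_eq_ediv_of_pos (show (0:Int) < d by omega)]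
        exact Int.ediv_mul_cancel hdvd
      rw [if_pos hm]
      rw [← step_char n d e (PySem.Int.floordiv n d) hd hle hdvd hq]
      have hacc' : (e ∈
            if 2 ≤ PySem.Int.floordiv n d then (if 2 ≤ d then acc.add d else acc).add (PySem.Int.floordiv n d)
            else if 2 ≤ d then acc.add d else acc) ↔
          (e ∈ acc ∨ (2 ≤ d ∧ e = d) ∨ (2 ≤ PySem.Int.floordiv n d ∧ e = PySem.Int.floordiv n d)) := by
        split_ifs with h1 h2 h2 <;> (try simp only [PySem.Set.mem_add]) <;>
          constructor <;> intro hx <;> tauto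
      rw [hacc']
      simp only [or_assoc]
    · have hnd : ¬ d ∣ n := fun h => hm ((PySem.Int.mod_eq_zero_iff_dvd n d).mpr h)
      rw [if_neg hm, step_char' n d e hnd]
  | case2 d acc hle =>
    intro hd
    constructor
    · intro h; exact Or.inl h
    · rintro (h | ⟨h2, ⟨hde, hee, _⟩ | ⟨c, hc, hdc, hcc⟩⟩)
      · exact h
      · exact absurd (le_trans (by nlinarith : d * d ≤ e * e) hee) hle
      · exact absurd (le_trans (by nlinarith : d * d ≤ c * c) hcc) hle

theorem nodup_collectDivisors (n : Int) (d : Int) (acc : PySem.Set Int) (h : acc.Nodup) :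
    (collectDivisors n d acc).Nodup := by
  fun_induction collectDivisors n d acc with
  | case1 d acc hle ih =>
    apply ih
    split_ifs <;>
      first
        | exact h
        | exact PySem.Set.nodup_add _ _ h
        | exact PySem.Set.nodup_add _ _ (PySem.Set.nodup_add _ _ h)
  | case2 d acc hle => exact h

-- the divisors of n in [2, n], characterised
theorem mem_collectDivisors_one (n : Int) (e : Int) :
    e ∈ collectDivisors n 1 PySem.Set.empty ↔ 2 ≤ e ∧ e ≤ n ∧ e ∣ n := by
  rw [mem_collectDivisors n 1 PySem.Set.empty e (le_refl 1)]
  simp only [PySem.Set.empty, List.not_mem_nil, false_or]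
  constructor
  · rintro ⟨h2, ⟨_, hee, hdvd⟩ | ⟨c, hc, h1c, hcc⟩⟩
    · exact ⟨h2, by nlinarith, hdvd⟩
    · exact ⟨h2, by nlinarith, ⟨c, hc⟩⟩
  · rintro ⟨h2, hen, ⟨c, hc⟩⟩
    refine ⟨h2, ?_⟩
    by_cases hee : e * e ≤ n
    · exact Or.inl ⟨by omega, hee, ⟨c, hc⟩⟩
    · have hc1 : 1 ≤ c := by nlinarith
      have hce : c < e := by nlinarith
      exact Or.inr ⟨c, hc, hc1, by nlinarith⟩

-- the sorted divisor set is exactly A's filtered range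
theorem sorted_collectDivisors_eq (n : Int) :
    PySem.List.sorted (collectDivisors n 1 PySem.Set.empty) (fun x => x) false =
      (PySem.List.pyRange 2 (n + 1) 1).filter (fun i => decide (PySem.Int.mod n i = 0)) := by
  apply PySem.List.sorted_eq_of_perm_of_pairwise_lt
  · rw [List.perm_ext_iff_of_nodup
      (List.Nodup.filter _ (PySem.List.nodup_pyRange_one 2 (n + 1)))
      (nodup_collectDivisors n 1 PySem.Set.empty List.nodup_nil)]
    intro a
    rw [mem_collectDivisors_one, List.mem_filter, PySem.List.mem_pyRange_one,
      decide_eq_true_iff, PySem.Int.mod_eq_zero_iff_dvd]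
    constructor
    · rintro ⟨⟨h1, h2⟩, h3⟩; exact ⟨h1, by omega, h3⟩
    · rintro ⟨h1, h2, h3⟩; exact ⟨⟨h1, by omega⟩, h3⟩
  · exact List.Pairwise.filter _ (PySem.List.pairwise_lt_pyRange_one 2 (n + 1))

-- 'for i in l: if p(i): <update>' is a fold over the p-filtered list (List.foldl_filter)
theorem foldl_ite_filter {γ : Type} (l : List Int) (p : Int → Prop) [DecidablePred p]
    (f : γ → Int → γ) (init : γ) :
    l.foldl (fun st i => if p i then f st i else st) init =
      (l.filter (fun i => decide (p i))).foldl f init := by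
  rw [List.foldl_filter]; simp

-- B's inner count over the precomputed digit list is A's count over the characters
theorem count_bridge (n i : Int) :
    countB (((PySem.Int.toStr n).toList).map pyDigit) i = countA n i := by
  unfold countB countA
  rw [List.foldl_map]

-- ===== VERDICT (by name: the statement is the Claim_ definition above) =====
theorem find_divisor_with_max_coprime_digits_spec : Claim_equal_find_divisor_with_max_coprime_digits := by
  intro n _
  unfold Spec_find_divisor_with_max_coprime_digits
  unfold find_divisor_with_max_coprime_digits find_divisor_with_max_coprime_digits_alt
  rw [foldl_ite_filter]
  simp only [count_bridge, sorted_collectDivisors_eq]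
  by_cases hnil : collectDivisors n 1 PySem.Set.empty = []
  · rw [if_pos hnil]
    have hLnil : (PySem.List.pyRange 2 (n + 1) 1).filter
        (fun i => decide (PySem.Int.mod n i = 0)) = [] := by
      rw [← sorted_collectDivisors_eq, hnil]
      rfl
    rw [hLnil]
    rfl
  · rw [if_neg hnil]
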